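-- pv_equiv track=rewrite | github.com/0x1amy0urdad/Guidance | src/bg3moddinglib/_mod_tools.py | make_mod_short_name
-- ===== SOURCE A (Python) =====
-- def make_mod_short_name(name: str) -> str:
--     valid_chars = 'QWERTYUIOPASDFGHJKLZXCVBNMqwertyuiopasdfghjklzxcvbnm0123456789.-_'
--     result = ''
--     for c in name:
--         if c in valid_chars:
--             result += c
--     if len(result) > 48:
--         return result[:48]
--     return result
-- ===== SOURCE B (Python) =====
-- import re
--
-- _INVALID = re.compile(r'[^A-Za-z0-9._-]')
--
-- def make_mod_short_name(name: str) -> str: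
--     return _INVALID.sub('', name)[:48]
-- ===== Notes on version B (the rewrite author's own statement) =====
-- stated objective: idiomatic
-- what changed: The explicit per-character accumulation loop with a membership test against a 65-char string is replaced by a single precompiled regex substitution deleting every character outside the class [A-Za-z0-9._-], followed by an unconditional [:48] slice (the len>48 guard is unnecessary).
import Mathlib
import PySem

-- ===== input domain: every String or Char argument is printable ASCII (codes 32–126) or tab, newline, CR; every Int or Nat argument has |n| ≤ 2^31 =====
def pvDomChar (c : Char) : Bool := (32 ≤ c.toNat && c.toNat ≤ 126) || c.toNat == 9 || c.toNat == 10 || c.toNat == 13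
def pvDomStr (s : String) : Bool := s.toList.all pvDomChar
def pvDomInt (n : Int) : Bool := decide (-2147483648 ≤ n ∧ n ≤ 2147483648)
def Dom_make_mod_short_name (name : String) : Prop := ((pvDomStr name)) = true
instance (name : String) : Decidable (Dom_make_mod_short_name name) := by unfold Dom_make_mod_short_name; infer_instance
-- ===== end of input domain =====

-- B replaces the explicit membership-filter loop by a regex substitution deleting invalid
-- characters plus an unconditional [:48] slice (more idiomatic; same result).


-- ===== PORT A =====
-- the 65-character valid_chars string (for a single char c, Python's `c in valid_chars` is list membership)
def validChars : List Char := "QWERTYUIOPASDFGHJKLZXCVBNMqwertyuiopasdfghjklzxcvbnm0123456789.-_".toList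

def make_mod_short_name (name : String) : String :=
  let result := name.toList.foldl (fun acc c => if c ∈ validChars then acc ++ [c] else acc) []
  if result.length > 48 then String.ofList (PySem.List.slice result none (some 48))
  else String.ofList result

-- ===== PORT B =====
-- the regex character class [A-Za-z0-9._-]; exact: the class contains only ASCII literals/ranges
def inClassB (c : Char) : Bool :=
  ('A' ≤ c && c ≤ 'Z') || ('a' ≤ c && c ≤ 'z') || ('0' ≤ c && c ≤ '9')
    || c == '.' || c == '_' || c == '-'

-- re.sub(r'[^A-Za-z0-9._-]', '', name) keeps exactly the characters in the class; then [:48]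
def make_mod_short_name_alt (name : String) : String :=
  String.ofList (PySem.List.slice (name.toList.filter inClassB) none (some 48))

-- ===== PRECONDITION & SPEC =====
def Spec_make_mod_short_name (name : String) (out : String) : Prop := out = make_mod_short_name_alt name
instance (name : String) (out : String) : Decidable (Spec_make_mod_short_name name out) := by unfold Spec_make_mod_short_name; infer_instance

-- ===== CLAIM (what is proved, stated in full; the proofs are below) =====
def Claim_equal_make_mod_short_name : Prop := ∀ (name : String), Dom_make_mod_short_name name → Spec_make_mod_short_name name (make_mod_short_name name)

-- ===== LEMMAS AND PROOFS =====

-- membership in validChars agrees with the regex class, checked code-by-code for codes < 127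
set_option maxRecDepth 8192 in
theorem class_eq_small : ∀ n : Fin 127,
    (decide (Char.ofNat n.1 ∈ validChars)) = inClassB (Char.ofNat n.1) := by decide

theorem class_eq (c : Char) (h : c.toNat ≤ 126) :
    (decide (c ∈ validChars)) = inClassB c := by
  have hv : Char.ofNat c.toNat = c := Char.ofNat_toNat c
  have := class_eq_small ⟨c.toNat, by omega⟩
  rwa [hv] at this

theorem filter_eq (name : String) (hd : Dom_make_mod_short_name name) :
    name.toList.filter (fun c => decide (c ∈ validChars)) = name.toList.filter inClassB := by
  refine List.filter_congr ?_
  intro c hc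
  have hdom : pvDomChar c = true := by
    have := (List.all_eq_true.mp hd) c hc
    exact this
  have : c.toNat ≤ 126 := by
    simp [pvDomChar] at hdom
    omega
  exact class_eq c this

theorem make_mod_short_name_spec' (name : String) (hd : Dom_make_mod_short_name name) :
    make_mod_short_name name = make_mod_short_name_alt name := by
  unfold make_mod_short_name make_mod_short_name_alt
  have hfun : (fun (acc : List Char) c => if c ∈ validChars then acc ++ [c] else acc)
      = (fun acc c => if (fun c => decide (c ∈ validChars)) c = true then acc ++ [id c] else acc) := by
    funext acc c; simp
  rw [hfun, PySem.List.foldl_append_if (fun c => decide (c ∈ validChars)) id]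
  simp only [List.nil_append, List.map_id]
  rw [filter_eq name hd]
  set l := name.toList.filter inClassB with hl
  by_cases h : l.length > 48
  · simp [h]
  · have h48 : l.length ≤ 48 := by omega
    rw [show PySem.List.slice l none (some 48) = l.take (Int.toNat 48) from
      PySem.List.slice_to (xs := l) (b := 48) (by norm_num)]
    simp [h, List.take_of_length_le (by simpa using h48)]

-- ===== VERDICT (by name: the statement is the Claim_ definition above) =====
theorem make_mod_short_name_spec : Claim_equal_make_mod_short_name := by
  intro name hd
  exact make_mod_short_name_spec' name hd
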